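-- pv_equiv track=rewrite | github.com/zstoebs/Daily-Coding-Problem | November 2019/11-19-2019.py | hopscotch
-- ===== SOURCE A (Python) =====
-- def hopscotch(arr=list()):
--
--     n = len(arr)
--
--     cur = 0
--     start = None
--     while cur < n:
--         start = arr[cur]
--         if start == 0:
--             return False
--
--         try:
--             mx = max(arr[cur+1:cur+start+1])
--             # when it can jump past the end of the array
--             if cur + start + 1 >= n:
--                 return True
--
--         # occurs when at the last element and it's greater than 0
--         except ValueError:
--             return True
--
--         cur += 1
--         while arr[cur] != mx:
--             cur += 1
--
--     return True
-- ===== SOURCE B (Python) =====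
-- def hopscotch(arr=list()):
--     # Right-to-left DP: res[i] = can we finish when the traversal stands at index i.
--     n = len(arr)
--     res = [False] * n
--     for i in range(n - 1, -1, -1):
--         v = arr[i]
--         if v == 0:
--             res[i] = False
--         else:
--             w = arr[i + 1:i + v + 1]          # the jump window (it always starts at i+1)
--             if not w or i + v + 1 >= n:
--                 res[i] = True
--             else:
--                 best = 0                      # leftmost argmax inside the window
--                 for j in range(1, len(w)):
--                     if w[j] > w[best]:
--                         best = j
--                 res[i] = res[i + 1 + best]
--     return res[0] if n else True
-- ===== Notes on version B (the rewrite author's own statement) =====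
-- stated objective: alternative
-- what changed: B computes reachability right-to-left as a DP table over every start index, slicing each jump window once and taking its leftmost argmax in a single pass, instead of A's forward single-path simulation that takes a slice max and then rescans the array for its position.
import Mathlib
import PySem

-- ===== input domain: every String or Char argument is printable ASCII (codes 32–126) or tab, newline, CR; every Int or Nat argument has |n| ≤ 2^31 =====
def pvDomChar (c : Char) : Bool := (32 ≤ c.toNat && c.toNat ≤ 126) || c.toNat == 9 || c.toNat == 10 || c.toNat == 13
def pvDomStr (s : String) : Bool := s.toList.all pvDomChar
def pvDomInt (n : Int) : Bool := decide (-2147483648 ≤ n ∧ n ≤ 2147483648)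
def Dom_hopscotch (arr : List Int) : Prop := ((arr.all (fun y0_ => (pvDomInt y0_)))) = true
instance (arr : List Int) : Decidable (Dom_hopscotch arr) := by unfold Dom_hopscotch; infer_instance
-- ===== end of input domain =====

-- B replaces A's forward single-path simulation (slice max + position rescan) by a right-to-left
-- DP table over all start indices with one leftmost-argmax pass per window; objective: alternative.


-- ===== PORT A =====
-- A's inner "while arr[cur] != mx: cur += 1".  On an out-of-range cur Python would raise
-- IndexError; that branch returns cur here and is unreachable (mx always occurs at some
-- index ≥ cur, since it is the max of a slice that starts at cur).
def hopAFind (arr : List Int) (mx : Int) (cur : Nat) : Nat :=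
  if _h : cur < arr.length then
    if arr.getD cur 0 = mx then cur else hopAFind arr mx (cur + 1)
  else cur
termination_by arr.length - cur

-- cited by hopALoop's decreasing_by
lemma hopAFind_ge (arr : List Int) (mx : Int) (cur : Nat) : cur ≤ hopAFind arr mx cur := by
  rw [hopAFind]
  split
  · split
    · exact le_refl _
    · have := hopAFind_ge arr mx (cur + 1); omega
  · exact le_refl _
termination_by arr.length - cur

-- A's outer "while cur < n" loop
def hopALoop (arr : List Int) (cur : Nat) : Bool :=
  if _h : cur < arr.length then
    let start := arr.getD cur 0        -- arr[cur], in range since cur < n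
    if start = 0 then false
    else
      match PySem.List.max? (PySem.List.slice arr (some ((cur : Int) + 1)) (some ((cur : Int) + start + 1))) (fun x => x) with
      | none => true                   -- max() of an empty slice: the ValueError branch → return True
      | some mx =>
          if (cur : Int) + start + 1 ≥ (arr.length : Int) then true
          else hopALoop arr (hopAFind arr mx (cur + 1))
  else true
termination_by arr.length - cur
decreasing_by
  have := hopAFind_ge arr mx (cur + 1); omega

def hopscotch (arr : List Int) : Bool := hopALoop arr 0

-- ===== PORT B =====
-- body of B's "for i in range(n-1, -1, -1)" loop: the value stored into res[i]
def hopBStep (arr : List Int) (i : Nat) (res : List Bool) : Bool :=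
  let v := arr.getD i 0
  if v = 0 then false
  else
    let w := PySem.List.slice arr (some ((i : Int) + 1)) (some ((i : Int) + v + 1))
    if w = [] ∨ (i : Int) + v + 1 ≥ (arr.length : Int) then true
    else
      let best := (PySem.List.pyRange 1 (PySem.List.len w) 1).foldl
        (fun b j => if PySem.List.pyGetD w j 0 > PySem.List.pyGetD w b 0 then j else b) 0
      PySem.List.pyGetD res ((i : Int) + 1 + best) false

-- B's countdown loop, filling res from index i-1 down to 0
def hopBBuild (arr : List Int) : Nat → List Bool → List Bool
  | 0, res => res
  | i + 1, res => hopBBuild arr i (PySem.List.pySetD res (i : Int) (hopBStep arr i res))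

def hopscotch_alt (arr : List Int) : Bool :=
  let n := arr.length
  let res := hopBBuild arr n (List.replicate n false)
  if 0 < n then PySem.List.pyGetD res 0 false else true

-- ===== PRECONDITION & SPEC =====
def Spec_hopscotch (arr : List Int) (out : Bool) : Prop := out = hopscotch_alt arr
instance (arr : List Int) (out : Bool) : Decidable (Spec_hopscotch arr out) := by unfold Spec_hopscotch; infer_instance

-- ===== CLAIM (what is proved, stated in full; the proofs are below) =====
def Claim_equal_hopscotch : Prop := ∀ (arr : List Int), Dom_hopscotch arr → Spec_hopscotch arr (hopscotch arr)

-- ===== LEMMAS AND PROOFS =====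

-- hopAFind returns the first index ≥ l holding mx, given that b is such an index and none before it is
lemma hopAFind_eq (arr : List Int) (mx : Int) :
    ∀ (d l b : Nat), b - l = d → l ≤ b → b < arr.length → arr.getD b 0 = mx →
      (∀ j, l ≤ j → j < b → arr.getD j 0 ≠ mx) → hopAFind arr mx l = b := by
  intro d
  induction d with
  | zero =>
      intro l b hd hlb hb hmx _
      have hl : l = b := by omega
      subst hl
      rw [hopAFind, dif_pos hb, if_pos hmx]
  | succ d ih =>
      intro l b hd hlb hb hmx hne
      have hlb' : l < b := by omega
      have hl : l < arr.length := by omega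
      rw [hopAFind]
      rw [dif_pos hl, if_neg (hne l le_rfl hlb')]
      exact ih (l + 1) b (by omega) (by omega) hb hmx (fun j h1 h2 => hne j (by omega) h2)

-- B's inner fold computes (as an Int) the leftmost argmax position of the window list w over [0, m]
lemma argmax_spec (w : List Int) :
    ∀ (m : Nat), m < w.length →
      ∃ bn : Nat,
        (PySem.List.pyRange 1 ((m : Int) + 1) 1).foldl
            (fun b j => if PySem.List.pyGetD w j 0 > PySem.List.pyGetD w b 0 then j else b) 0
          = (bn : Int) ∧
        bn ≤ m ∧
        (∀ j, j ≤ m → w.getD j 0 ≤ w.getD bn 0) ∧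
        (∀ j, j < bn → w.getD j 0 < w.getD bn 0) := by
  intro m
  induction m with
  | zero =>
      intro _
      refine ⟨0, ?_, le_rfl, ?_, ?_⟩
      · rw [PySem.List.pyRange_one_eq_nil (by omega)]
        simp
      · intro j h2
        have : j = 0 := by omega
        simp [this]
      · intro j h2; omega
  | succ m ih =>
      intro hlen
      obtain ⟨bn, heq, h2, h3, h4⟩ := ih (by omega)
      have hsplit : PySem.List.pyRange 1 (((m + 1 : Nat) : Int) + 1) 1
          = PySem.List.pyRange 1 ((m : Int) + 1) 1 ++ [(m : Int) + 1] := by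
        have : (((m + 1 : Nat) : Int) + 1) = ((m : Int) + 1) + 1 := by push_cast; ring
        rw [this, PySem.List.pyRange_one_succ_right (by omega)]
      rw [hsplit, List.foldl_append, heq]
      simp only [List.foldl_cons, List.foldl_nil]
      have hcast : (m : Int) + 1 = ((m + 1 : Nat) : Int) := by push_cast; ring
      rw [hcast]
      simp only [PySem.List.pyGetD_natCast]
      by_cases hgt : w.getD (m + 1) 0 > w.getD bn 0
      · refine ⟨m + 1, by rw [if_pos hgt], le_rfl, ?_, ?_⟩
        · intro j hj2
          rcases Nat.lt_or_ge j (m + 1) with h | h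
          · exact le_of_lt (lt_of_le_of_lt (h3 j (by omega)) hgt)
          · have : j = m + 1 := by omega
            simp [this]
        · intro j hj2
          exact lt_of_le_of_lt (h3 j (by omega)) hgt
      · refine ⟨bn, by rw [if_neg hgt], by omega, ?_, h4⟩
        intro j hj2
        rcases Nat.lt_or_ge j (m + 1) with h | h
        · exact h3 j (by omega)
        · have : j = m + 1 := by omega
          subst this; omega

-- one DP entry of B equals A's loop started at that index
lemma hopBStep_eq (arr : List Int) (i : Nat) (res : List Bool)
    (hi : i < arr.length)
    (hres : ∀ j, i < j → j < arr.length → res.getD j false = hopALoop arr j) :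
    hopBStep arr i res = hopALoop arr i := by
  rw [hopALoop, dif_pos hi]
  unfold hopBStep
  simp only []
  by_cases hz : arr.getD i 0 = 0
  · rw [if_pos hz, if_pos hz]
  · rw [if_neg hz, if_neg hz]
    set v := arr.getD i 0 with hv
    set w := PySem.List.slice arr (some ((i : Int) + 1)) (some ((i : Int) + v + 1)) with hwdef
    by_cases hwnil : w = []
    · rw [if_pos (Or.inl hwnil), hwnil, (PySem.List.max?_eq_none_iff ([] : List Int) (fun x => x)).mpr rfl]
    · obtain ⟨mx, hmx⟩ : ∃ mx, PySem.List.max? w (fun x => x) = some mx := by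
        cases h : PySem.List.max? w (fun x => x) with
        | none => exact absurd ((PySem.List.max?_eq_none_iff _ _).mp h) hwnil
        | some mx => exact ⟨mx, rfl⟩
      rw [hmx]
      by_cases hbig : (i : Int) + v + 1 ≥ (arr.length : Int)
      · rw [if_pos (Or.inr hbig)]
        exact (if_pos hbig).symm
      · rw [if_neg (by rw [not_or]; exact ⟨hwnil, by omega⟩)]
        have hred : (match some mx with
            | none => true
            | some mx' => if (i:Int)+v+1 ≥ (arr.length:Int) then true
                          else hopALoop arr (hopAFind arr mx' (i+1))) =
            (if (i:Int)+v+1 ≥ (arr.length:Int) then true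
             else hopALoop arr (hopAFind arr mx (i+1))) := rfl
      -- the window as a drop/take of arr (its start i+1 is in range, so w starts at index i+1)
        rw [hred, if_neg hbig]
        have hclamp1 : PySem.List.clampIdx arr.length ((i : Int) + 1) = i + 1 := by
          rw [show ((i : Int) + 1) = ((i + 1 : Nat) : Int) from by push_cast; ring,
            PySem.List.clampIdx_natCast]
          omega
        have hw : w = (arr.drop (i + 1)).take
            (PySem.List.clampIdx arr.length ((i : Int) + v + 1) - (i + 1)) := by
          rw [hwdef]
          simp [PySem.List.slice, hclamp1]
        set t := PySem.List.clampIdx arr.length ((i : Int) + v + 1) - (i + 1) with htdef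
        set wl := w.length with hwldef
        have hwl : wl = min t (arr.length - (i + 1)) := by
          rw [hwldef, hw]
          simp [List.length_take, List.length_drop]
        have hwl1 : 1 ≤ wl := by
          rcases Nat.eq_zero_or_pos wl with h | h
          · exact absurd (List.eq_nil_of_length_eq_zero (hwldef ▸ h)) hwnil
          · omega
        have hwln : i + 1 + wl ≤ arr.length := by omega
        have hidx : ∀ k, k < wl → w.getD k 0 = arr.getD (i + 1 + k) 0 := by
          intro k hk
          rw [List.getD_eq_getElem _ _ (by omega), List.getD_eq_getElem _ _ (by omega)]
          rw [List.getElem_of_eq hw, List.getElem_take, List.getElem_drop]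
        obtain ⟨bn, heq, hb2, hb3, hb4⟩ := argmax_spec w (wl - 1) (by omega)
        have hblt : bn < wl := by omega
        have hcast : ((wl - 1 : Nat) : Int) + 1 = PySem.List.len w := by
          rw [PySem.List.len_eq, ← hwldef]
          omega
        rw [hcast] at heq
        rw [heq]
        -- the fold's result holds the window max, i.e. mx
        have hmxmax := PySem.List.max?_isMax hmx
        have hbn_w : w.getD bn 0 ∈ w := by
          rw [List.getD_eq_getElem _ _ (by omega)]
          exact List.getElem_mem _
        have h5 : w.getD bn 0 ≤ mx := hmxmax _ hbn_w
        have h6 : mx ≤ w.getD bn 0 := by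
          obtain ⟨k, hk, hkeq⟩ := List.getElem_of_mem (PySem.List.max?_mem hmx)
          rw [← List.getD_eq_getElem _ 0 hk] at hkeq
          rw [← hkeq]
          exact hb3 k (by omega)
        have hmxbn : w.getD bn 0 = mx := le_antisymm h5 h6
        -- A's rescan stops exactly at the window's leftmost argmax
        have hfind : hopAFind arr mx (i + 1) = i + 1 + bn :=
          hopAFind_eq arr mx bn (i + 1) (i + 1 + bn) (by omega) (by omega) (by omega)
            (by rw [← hidx bn hblt]; exact hmxbn)
            (fun j hj1 hj2 => by
              have hk : j - (i + 1) < bn := by omega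
              have := hb4 (j - (i + 1)) hk
              rw [hidx (j - (i + 1)) (by omega)] at this
              rw [show i + 1 + (j - (i + 1)) = j from by omega] at this
              omega)
        rw [hfind]
        rw [show (i : Int) + 1 + (bn : Int) = ((i + 1 + bn : Nat) : Int) from by push_cast; ring,
          PySem.List.pyGetD_natCast]
        exact hres (i + 1 + bn) (by omega) (by omega)

-- B's table agrees with A's loop at every index
lemma hopBBuild_inv (arr : List Int) :
    ∀ (i : Nat) (res : List Bool), res.length = arr.length →
      (∀ j, i ≤ j → j < arr.length → res.getD j false = hopALoop arr j) →
      ∀ j, j < arr.length → (hopBBuild arr i res).getD j false = hopALoop arr j := by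
  intro i
  induction i with
  | zero =>
      intro res hlen hinv j hj
      rw [hopBBuild]
      exact hinv j (by omega) hj
  | succ i ih =>
      intro res hlen hinv j hj
      rw [hopBBuild]
      apply ih
      · rw [PySem.List.pySetD_natCast, List.length_set]; exact hlen
      · intro j' hj1 hj2
        rw [PySem.List.pySetD_natCast]
        by_cases hji : j' = i
        · subst hji
          have hlt : j' < res.length := by omega
          rw [show (res.set j' (hopBStep arr j' res)).getD j' false = hopBStep arr j' res by
            simp [List.getD, hlt]]
          exact hopBStep_eq arr j' res hj2 (fun k hk1 hk2 => hinv k (by omega) hk2)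
        · rw [show (res.set i (hopBStep arr i res)).getD j' false = res.getD j' false by
            simp [List.getD, List.getElem?_set_ne (Ne.symm hji)]]
          exact hinv j' (by omega) hj2
      · exact hj

-- ===== VERDICT (by name: the statement is the Claim_ definition above) =====
theorem hopscotch_spec : Claim_equal_hopscotch := by
  intro arr _hdom
  unfold Spec_hopscotch hopscotch hopscotch_alt
  by_cases hn : 0 < arr.length
  · simp only [hn, if_pos]
    rw [PySem.List.pyGetD_zero]
    exact (hopBBuild_inv arr arr.length (List.replicate arr.length false)
      (by simp) (by omega) 0 hn).symm
  · rw [hopALoop]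
    simp [hn]
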